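-- pv_equiv track=rewrite | github.com/ganeshmenda123/codemind-python | Automorphic_Number.py | autom
-- ===== SOURCE A (Python) =====
-- def autom(n):
--     dc=0
--     temp1=n
--     while(n):
--         dc+=1
--         n=n//10
--     sq=temp1**2
--     sdc=0
--     rev=0
--     while(sq):
--         r=sq%10
--         sdc+=1
--         rev=rev*10+r
--         if(sdc==dc):
--             break
--         sq=sq//10
--     return rev
-- ===== SOURCE B (Python) =====
-- def autom(n):
--     # One fused pass: walk n and its square in lockstep, so the separate
--     # digit-count loop and the counter/break disappear.
--     def go(m, sq, rev):
--         if m == 0: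
--             return rev
--         return go(m // 10, sq // 10, rev * 10 + sq % 10)
--     return go(n, n * n, 0)
-- ===== Notes on version B (the rewrite author's own statement) =====
-- stated objective: simpler
-- what changed: Replaces A's two while-loops (digit count, then extraction with a counter and break) by one tail-recursive lockstep pass over n and its square, with no digit counter at all.
import Mathlib
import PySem

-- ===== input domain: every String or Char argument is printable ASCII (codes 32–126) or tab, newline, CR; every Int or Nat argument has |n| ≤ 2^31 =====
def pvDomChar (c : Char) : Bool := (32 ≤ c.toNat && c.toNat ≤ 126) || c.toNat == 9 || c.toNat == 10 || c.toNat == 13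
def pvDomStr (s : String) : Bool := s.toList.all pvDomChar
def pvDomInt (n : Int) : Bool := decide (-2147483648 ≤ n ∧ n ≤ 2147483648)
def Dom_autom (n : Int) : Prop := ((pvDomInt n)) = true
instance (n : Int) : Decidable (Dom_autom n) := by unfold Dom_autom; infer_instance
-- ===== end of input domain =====

-- B fuses A's two while-loops (digit count, then bounded extraction) into one
-- lockstep pass over n and its square; objective: simpler. Pre_ excludes
-- negative n, where A's first while-loop never terminates (repeated floor
-- division toward minus infinity never reaches zero).


-- ===== PORT A =====
-- first while-loop: dc counts the digits of n (guard `0 < n` only totalizes: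
-- Python loops forever on negative n, which Pre_ excludes)
def automDc (n dc : Int) : Int :=
  if h : 0 < n then automDc (PySem.Int.floordiv n 10) (dc + 1) else dc
termination_by n.toNat
decreasing_by
  rw [PySem.Int.floordiv_eq_ediv_of_pos (by norm_num : (0:Int) < 10)]
  omega

-- second while-loop: reverse digits of sq, breaking when sdc == dc
def automRev (sq sdc dc rev : Int) : Int :=
  if h : 0 < sq then
    let r := PySem.Int.mod sq 10
    let sdc' := sdc + 1
    let rev' := rev * 10 + r
    if sdc' = dc then rev'
    else automRev (PySem.Int.floordiv sq 10) sdc' dc rev'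
  else rev
termination_by sq.toNat
decreasing_by
  rw [PySem.Int.floordiv_eq_ediv_of_pos (by norm_num : (0:Int) < 10)]
  omega

def autom (n : Int) : Int :=
  let dc := automDc n 0
  let sq := n * n
  automRev sq 0 dc 0

-- ===== PORT B =====
-- single lockstep pass (guard `0 < m` only totalizes; Python B recurses
-- forever on negative m, excluded by Pre_)
def automGo (m sq rev : Int) : Int :=
  if h : 0 < m then
    automGo (PySem.Int.floordiv m 10) (PySem.Int.floordiv sq 10)
      (rev * 10 + PySem.Int.mod sq 10)
  else rev
termination_by m.toNat
decreasing_by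
  rw [PySem.Int.floordiv_eq_ediv_of_pos (by norm_num : (0:Int) < 10)]
  omega

def autom_alt (n : Int) : Int := automGo n (n * n) 0

-- ===== PRECONDITION & SPEC =====
-- Pre_ excludes negative n, on which Python A never returns (its first
-- while-loop diverges: floor division toward minus infinity never reaches zero).
def Pre_autom (n : Int) : Prop := 0 ≤ n
instance (n : Int) : Decidable (Pre_autom n) := by unfold Pre_autom; infer_instance
def pvWitness_autom : Int := (376)

def Spec_autom (n : Int) (out : Int) : Prop := out = autom_alt n
instance (n : Int) (out : Int) : Decidable (Spec_autom n out) := by unfold Spec_autom; infer_instance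

-- ===== CLAIM (what is proved, stated in full; the proofs are below) =====
def Claim_equal_autom : Prop := ∀ (n : Int), Dom_autom n → Pre_autom n → Spec_autom n (autom n)

-- ===== LEMMAS AND PROOFS =====

theorem automDc_ge (m : Int) : ∀ c, c ≤ automDc m c := by
  induction hk : m.toNat using Nat.strong_induction_on generalizing m with
  | _ k ih =>
      intro c
      by_cases h : 0 < m
      · rw [automDc, dif_pos h]
        have hlt : (PySem.Int.floordiv m 10).toNat < k := by
          rw [PySem.Int.floordiv_eq_ediv_of_pos (by norm_num : (0:Int) < 10)]
          omega
        exact le_trans (by omega) (ih _ hlt _ rfl (c + 1))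
      · rw [automDc, dif_neg h]

/-- Key loop lemma: on positive `m ≤ sq`, A's counted-and-break extraction loop
    (with `dc = automDc m c`, counter starting at `c`) equals B's lockstep pass. -/
theorem automRev_eq_go (m : Int) : ∀ sq rev c, 0 < m → m ≤ sq →
    automRev sq c (automDc m c) rev = automGo m sq rev := by
  induction hk : m.toNat using Nat.strong_induction_on generalizing m with
  | _ k ih =>
      intro sq rev c h hle
      have hsq : 0 < sq := lt_of_lt_of_le h hle
      rw [automDc, dif_pos h]
      rw [automRev, dif_pos hsq]
      rw [automGo, dif_pos h]
      have h10 : (0:Int) < 10 := by norm_num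
      by_cases hz : 0 < PySem.Int.floordiv m 10
      · -- more digits remain in n: A's break branch is not taken
        have hne : ¬ (c + 1 = automDc (PySem.Int.floordiv m 10) (c + 1)) := by
          have h1 := automDc_ge (PySem.Int.floordiv (PySem.Int.floordiv m 10) 10) (c + 1 + 1)
          rw [automDc, dif_pos hz]
          omega
        simp only [if_neg hne]
        have hlt : (PySem.Int.floordiv m 10).toNat < k := by
          rw [PySem.Int.floordiv_eq_ediv_of_pos (by norm_num : (0:Int) < 10)]
          omega
        exact ih _ hlt _ rfl _ _ _ hz (by
          rw [PySem.Int.floordiv_eq_ediv_of_pos h10,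
              PySem.Int.floordiv_eq_ediv_of_pos h10] at *
          exact Int.ediv_le_ediv h10 hle)
      · -- n had exactly one digit left: A breaks, B's recursion terminates next step
        have hdc : automDc (PySem.Int.floordiv m 10) (c + 1) = c + 1 := by
          rw [automDc, dif_neg hz]
        rw [hdc, if_pos rfl, automGo, dif_neg hz]

-- ===== VERDICT (by name: the statement is the Claim_ definition above) =====
theorem autom_spec : Claim_equal_autom := by
  intro n _ hpre
  unfold Spec_autom autom autom_alt
  rcases lt_or_eq_of_le (hpre : (0:Int) ≤ n) with hpos | hzero
  · exact automRev_eq_go n (n * n) 0 0 hpos (le_mul_of_one_le_left (le_of_lt hpos) (by omega))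
  · subst hzero
    rw [automDc, dif_neg (by omega), automRev, dif_neg (by omega),
        automGo, dif_neg (by omega)]
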